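-- pv_equiv track=rewrite | github.com/Rupak143/DAA | 14. Min and Max seq.py | min_max_sequence
-- ===== SOURCE A (Python) =====
-- def min_max_sequence(numbers):
--     if not numbers:
--         return "List is empty"
--     min_sequence = [numbers[0]]
--     max_sequence = [numbers[0]]
--     min_value = numbers[0]
--     max_value = numbers[0]
--     for num in numbers[1:]:
--         if num < min_value:
--             min_value = num
--             min_sequence.append(num)
--         elif num > max_value:
--             max_value = num
--             max_sequence.append(num)
--     return min_sequence, max_sequence
-- ===== SOURCE B (Python) =====
-- def min_max_sequence(numbers):
--     if not numbers:
--         return [], []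
--     min_sequence = [numbers[0]]
--     min_value = numbers[0]
--     for num in numbers[1:]:
--         if num < min_value:
--             min_value = num
--             min_sequence.append(num)
--     max_sequence = [numbers[0]]
--     max_value = numbers[0]
--     for num in numbers[1:]:
--         if num > max_value:
--             max_value = num
--             max_sequence.append(num)
--     return min_sequence, max_sequence
-- ===== Notes on version B (the rewrite author's own statement) =====
-- stated objective: simpler
-- what changed: Replaces the interleaved single loop with four state variables by two independent linear passes (running-min pass, then running-max pass); valid because min_value <= max_value always, so A's elif branches are mutually exclusive.
-- outside the precondition, e.g. on min_max_sequence([]): A returns 'List is empty', B returns ([], [])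
import Mathlib
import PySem

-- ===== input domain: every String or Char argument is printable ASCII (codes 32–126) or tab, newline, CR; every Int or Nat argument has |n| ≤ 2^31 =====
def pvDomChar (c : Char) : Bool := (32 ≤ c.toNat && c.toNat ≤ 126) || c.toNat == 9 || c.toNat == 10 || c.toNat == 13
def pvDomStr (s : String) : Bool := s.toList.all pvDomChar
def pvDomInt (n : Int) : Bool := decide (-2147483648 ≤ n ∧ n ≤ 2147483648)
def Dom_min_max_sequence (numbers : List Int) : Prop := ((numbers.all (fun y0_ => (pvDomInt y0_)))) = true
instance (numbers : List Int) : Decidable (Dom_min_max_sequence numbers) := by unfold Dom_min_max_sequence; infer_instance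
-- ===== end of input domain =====

-- B replaces A's interleaved single loop by two independent running-min / running-max passes (simpler decomposition, same O(n) cost).

-- ===== PORT A =====
-- one interleaved loop over numbers[1:] carrying (min_sequence, max_sequence, min_value, max_value)
def pvLoopA : List Int → List Int → List Int → Int → Int → List Int × List Int
  | [], mins, maxs, _, _ => (mins, maxs)
  | num :: rest, mins, maxs, mn, mx =>
    if num < mn then pvLoopA rest (mins ++ [num]) maxs num mx
    else if num > mx then pvLoopA rest mins (maxs ++ [num]) mn num
    else pvLoopA rest mins maxs mn mx

def min_max_sequence (numbers : List Int) : List Int × List Int :=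
  match numbers with
  | [] => ([], [])  -- Python A returns the string "List is empty" here, not a pair; excluded by Pre_
  | x :: rest => pvLoopA rest [x] [x] x x

-- ===== PORT B =====
-- first pass: running minimum
def pvMinPass : List Int → List Int → Int → List Int
  | [], seq, _ => seq
  | num :: rest, seq, mn =>
    if num < mn then pvMinPass rest (seq ++ [num]) num else pvMinPass rest seq mn

-- second pass: running maximum
def pvMaxPass : List Int → List Int → Int → List Int
  | [], seq, _ => seq
  | num :: rest, seq, mx =>
    if num > mx then pvMaxPass rest (seq ++ [num]) num else pvMaxPass rest seq mx

def min_max_sequence_alt (numbers : List Int) : List Int × List Int :=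
  match numbers with
  | [] => ([], [])
  | x :: rest => (pvMinPass rest [x] x, pvMaxPass rest [x] x)

-- ===== PRECONDITION & SPEC =====
-- Pre_ excludes the empty list, on which A returns the string "List is empty" instead of a pair of lists.
def Pre_min_max_sequence (numbers : List Int) : Prop := numbers ≠ []
instance (numbers : List Int) : Decidable (Pre_min_max_sequence numbers) := by unfold Pre_min_max_sequence; infer_instance
def pvWitness_min_max_sequence : List Int := [3, 1, 4, 1, 5]

def Spec_min_max_sequence (numbers : List Int) (out : List Int × List Int) : Prop := out = min_max_sequence_alt numbers
instance (numbers : List Int) (out : List Int × List Int) : Decidable (Spec_min_max_sequence numbers out) := by unfold Spec_min_max_sequence; infer_instance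

-- ===== CLAIM (what is proved, stated in full; the proofs are below) =====
def Claim_equal_min_max_sequence : Prop := ∀ (numbers : List Int), Dom_min_max_sequence numbers → Pre_min_max_sequence numbers → Spec_min_max_sequence numbers (min_max_sequence numbers)

-- ===== LEMMAS AND PROOFS =====
-- Invariant mn ≤ mx makes A's elif branches mutually exclusive, so the interleaved loop
-- equals the pair of independent passes.
theorem pvLoopA_split (rest : List Int) : ∀ (mins maxs : List Int) (mn mx : Int), mn ≤ mx →
    pvLoopA rest mins maxs mn mx = (pvMinPass rest mins mn, pvMaxPass rest maxs mx) := by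
  induction rest with
  | nil => intro mins maxs mn mx _; rfl
  | cons num rest ih =>
    intro mins maxs mn mx h
    simp only [pvLoopA, pvMinPass, pvMaxPass]
    split_ifs with h1 h2 <;> first
      | (exact ih _ _ _ _ (by omega))
      | omega

-- ===== VERDICT (by name: the statement is the Claim_ definition above) =====
theorem min_max_sequence_spec : Claim_equal_min_max_sequence := by
  intro numbers _ hpre
  match numbers with
  | [] => exact absurd rfl hpre
  | x :: rest =>
    show min_max_sequence (x :: rest) = min_max_sequence_alt (x :: rest)
    simp only [min_max_sequence, min_max_sequence_alt]
    exact pvLoopA_split rest [x] [x] x x le_rfl
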